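-- pv_equiv track=rewrite | github.com/vivek18saha/faceMaskRecognition | DetectMaskAndRecognizeFace.py | select_largest_face
-- ===== SOURCE A (Python) =====
-- def select_largest_face(faces):
--     height = []
--     for face in faces:
--         (top, right, bottom, left) = face
--         h = bottom-top
--         height.append(h)
--     # (i, h) = max(enumerate(height))
--     i = height.index(max(height))
--     return(faces[i:i+1])
-- ===== SOURCE B (Python) =====
-- def select_largest_face(faces):
--     best_i = None
--     best_h = None
--     for i, face in enumerate(faces):
--         (top, right, bottom, left) = face
--         h = bottom - top
--         if best_i is None or h > best_h:
--             best_i = i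
--             best_h = h
--     if best_i is None:
--         raise ValueError("select_largest_face: empty faces")
--     return faces[best_i:best_i+1]
-- ===== Notes on version B (the rewrite author's own statement) =====
-- stated objective: simpler
-- what changed: Replaces the two-phase approach (materialize a full height list, then max() plus list.index) with a single enumerate pass that tracks the best height and its index, updating only on strict improvement so ties keep the first occurrence.
-- outside the precondition, e.g. on select_largest_face([]): A raises ValueError, B raises ValueError
import Mathlib
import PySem

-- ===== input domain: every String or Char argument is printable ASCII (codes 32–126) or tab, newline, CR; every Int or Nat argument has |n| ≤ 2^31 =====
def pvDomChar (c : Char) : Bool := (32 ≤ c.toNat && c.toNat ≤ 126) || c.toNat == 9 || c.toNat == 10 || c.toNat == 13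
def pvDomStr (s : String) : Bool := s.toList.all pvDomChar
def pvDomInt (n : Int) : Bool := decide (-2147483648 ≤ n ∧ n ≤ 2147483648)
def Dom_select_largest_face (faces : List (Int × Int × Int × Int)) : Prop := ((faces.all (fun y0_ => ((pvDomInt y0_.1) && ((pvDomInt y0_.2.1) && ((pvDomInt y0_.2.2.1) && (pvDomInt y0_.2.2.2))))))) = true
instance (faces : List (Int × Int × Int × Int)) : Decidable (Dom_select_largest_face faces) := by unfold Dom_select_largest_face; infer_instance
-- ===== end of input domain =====

-- B replaces A's three passes (build height list, max(), list.index) by one enumerate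
-- pass tracking the best height and its first index (objective: simpler).


-- ===== PORT A =====
def select_largest_face (faces : List (Int × Int × Int × Int)) : List (Int × Int × Int × Int) :=
  let height := faces.foldl (fun acc face =>
    let top := face.1; let bottom := face.2.2.1
    let h := bottom - top
    acc ++ [h]) []
  match PySem.List.max? height (fun y => y) with
  | none => []          -- max([]) raises ValueError; excluded by Pre_
  | some m =>
    match PySem.List.index? height m with
    | none => []        -- unreachable (m ∈ height)
    | some i => PySem.List.slice faces (some (i : Int)) (some ((i : Int) + 1))

-- ===== PORT B =====
def pvBStep (best : Option (Int × Int)) (p : Int × (Int × Int × Int × Int)) : Option (Int × Int) :=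
  let i := p.1
  let h := p.2.2.2.1 - p.2.1    -- bottom - top
  match best with
  | none => some (i, h)
  | some (bi, bh) => if h > bh then some (i, h) else some (bi, bh)

def select_largest_face_alt (faces : List (Int × Int × Int × Int)) : List (Int × Int × Int × Int) :=
  match (PySem.List.enumerate faces).foldl pvBStep none with
  | none => []          -- B raises ValueError here; excluded by Pre_
  | some (bi, _) => PySem.List.slice faces (some bi) (some (bi + 1))

-- ===== PRECONDITION & SPEC =====
-- Pre_ excludes only the empty list, on which both A (max([])) and B raise ValueError.
def Pre_select_largest_face (faces : List (Int × Int × Int × Int)) : Prop := faces ≠ []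
instance (faces : List (Int × Int × Int × Int)) : Decidable (Pre_select_largest_face faces) := by unfold Pre_select_largest_face; infer_instance
def pvWitness_select_largest_face : (List (Int × Int × Int × Int)) := [(1, 2, 5, 0), (0, 9, 3, 1)]

def Spec_select_largest_face (faces : List (Int × Int × Int × Int)) (out : List (Int × Int × Int × Int)) : Prop := out = select_largest_face_alt faces
instance (faces : List (Int × Int × Int × Int)) (out : List (Int × Int × Int × Int)) : Decidable (Spec_select_largest_face faces out) := by unfold Spec_select_largest_face; infer_instance

-- ===== CLAIM (what is proved, stated in full; the proofs are below) =====
def Claim_equal_select_largest_face : Prop := ∀ (faces : List (Int × Int × Int × Int)), Dom_select_largest_face faces → Pre_select_largest_face faces → Spec_select_largest_face faces (select_largest_face faces)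

-- ===== LEMMAS AND PROOFS =====

-- height of a face
def pvHgt (f : Int × Int × Int × Int) : Int := f.2.2.1 - f.1

theorem pv_heights_eq (faces : List (Int × Int × Int × Int)) (acc : List Int) :
    faces.foldl (fun acc face =>
      let top := face.1; let bottom := face.2.2.1
      let h := bottom - top
      acc ++ [h]) acc = acc ++ faces.map pvHgt := by
  induction faces generalizing acc with
  | nil => simp
  | cons f t ih => simp [ih, pvHgt]

theorem pv_le_foldl_max (l : List Int) (a : Int) : a ≤ l.foldl max a := by
  induction l generalizing a with
  | nil => simp
  | cons x t ih => exact le_trans (le_max_left a x) (ih (max a x))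

theorem pv_foldl_max_mem (l : List Int) (a : Int) :
    l.foldl max a = a ∨ l.foldl max a ∈ l := by
  induction l generalizing a with
  | nil => simp
  | cons x t ih =>
    simp only [List.foldl_cons]
    rcases ih (max a x) with h | h
    · rcases le_total x a with hxa | hxa
      · left; rw [h, max_eq_left hxa]
      · right; rw [h, max_eq_right hxa]; simp
    · right; exact List.mem_cons_of_mem _ h

theorem pv_index?_of_mem (v : Int) (l : List Int) (h : v ∈ l) :
    PySem.List.index? l v = some (l.idxOf v) := by
  induction l with
  | nil => simp at h
  | cons x t ih =>
    by_cases hx : x = v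
    · subst hx; rw [PySem.List.index?_cons_self]; simp
    · have hv : v ∈ t := by
        rcases List.mem_cons.mp h with h' | h'
        · exact absurd h'.symm hx
        · exact h'
      rw [PySem.List.index?_cons_of_ne t hx, ih hv]
      simp [hx]

-- B's loop, fed a running best (bi, bh), ends at the first index of the maximum
-- when it strictly improves on bh, and keeps (bi, bh) otherwise.
theorem pv_loop_inv (l : List (Int × Int × Int × Int)) (s bi bh : Int) :
    (PySem.List.enumerate l s).foldl pvBStep (some (bi, bh))
      = some (if bh < (l.map pvHgt).foldl max bh
              then ((s + ((((l.map pvHgt).idxOf ((l.map pvHgt).foldl max bh)) : Nat) : Int)),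
                    (l.map pvHgt).foldl max bh)
              else (bi, bh)) := by
  induction l generalizing s bi bh with
  | nil => simp
  | cons x t ih =>
    rw [PySem.List.enumerate_cons]
    have hstep : pvBStep (some (bi, bh)) (s, x)
        = if pvHgt x > bh then some (s, pvHgt x) else some (bi, bh) := by
      simp [pvBStep, pvHgt]
    by_cases hx : pvHgt x > bh
    · rw [List.foldl_cons, hstep, if_pos hx, ih]
      simp only [List.map_cons, List.foldl_cons, max_eq_right hx.le]
      have hle : pvHgt x ≤ (t.map pvHgt).foldl max (pvHgt x) := pv_le_foldl_max _ _
      by_cases himp : pvHgt x < (t.map pvHgt).foldl max (pvHgt x)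
      · rw [if_pos himp, if_pos (lt_trans hx himp)]
        have hne : (pvHgt x == (t.map pvHgt).foldl max (pvHgt x)) = false := by
          simp [ne_of_lt himp]
        simp only [List.idxOf_cons, hne, cond_false, Option.some.injEq, Prod.mk.injEq]
        refine ⟨by push_cast; ring, trivial⟩
      · have heq : (t.map pvHgt).foldl max (pvHgt x) = pvHgt x :=
          le_antisymm (not_lt.mp himp) hle
        rw [if_neg himp, if_pos (by rw [heq]; exact hx)]
        simp [heq]
    · rw [List.foldl_cons, hstep, if_neg hx, ih]
      simp only [List.map_cons, List.foldl_cons, max_eq_left (not_lt.mp hx)]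
      by_cases himp : bh < (t.map pvHgt).foldl max bh
      · rw [if_pos himp, if_pos himp]
        have hne : (pvHgt x == (t.map pvHgt).foldl max bh) = false := by
          simp [ne_of_lt (lt_of_le_of_lt (not_lt.mp hx) himp)]
        simp only [List.idxOf_cons, hne, cond_false, Option.some.injEq, Prod.mk.injEq]
        refine ⟨by push_cast; ring, trivial⟩
      · rw [if_neg himp, if_neg himp]

-- the whole of B's fold, on a nonempty list
theorem pv_fold_top (f : Int × Int × Int × Int) (t : List (Int × Int × Int × Int)) :
    (PySem.List.enumerate (f :: t) 0).foldl pvBStep none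
      = some (((((f :: t).map pvHgt).idxOf ((t.map pvHgt).foldl max (pvHgt f)) : Nat) : Int),
              (t.map pvHgt).foldl max (pvHgt f)) := by
  rw [PySem.List.enumerate_cons, List.foldl_cons]
  have hstep : pvBStep none (0, f) = some (0, pvHgt f) := by simp [pvBStep, pvHgt]
  rw [hstep, pv_loop_inv]
  by_cases himp : pvHgt f < (t.map pvHgt).foldl max (pvHgt f)
  · rw [if_pos himp]
    have hne : (pvHgt f == (t.map pvHgt).foldl max (pvHgt f)) = false := by
      simp [ne_of_lt himp]
    simp only [List.map_cons, List.idxOf_cons, hne, cond_false, Option.some.injEq, Prod.mk.injEq]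
    refine ⟨by push_cast; ring, trivial⟩
  · have heq : (t.map pvHgt).foldl max (pvHgt f) = pvHgt f :=
      le_antisymm (not_lt.mp himp) (pv_le_foldl_max _ _)
    rw [if_neg himp]
    simp [heq]

-- ===== VERDICT (by name: the statement is the Claim_ definition above) =====
theorem select_largest_face_spec : Claim_equal_select_largest_face := by
  intro faces _ hpre
  unfold Spec_select_largest_face
  match faces with
  | [] => exact absurd rfl hpre
  | f :: t =>
    have hMmem : (t.map pvHgt).foldl max (pvHgt f) ∈ (f :: t).map pvHgt := by
      rcases pv_foldl_max_mem (t.map pvHgt) (pvHgt f) with h | h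
      · rw [h]; simp
      · exact List.mem_cons_of_mem _ h
    have hA : select_largest_face (f :: t)
        = PySem.List.slice (f :: t)
            (some (((((f :: t).map pvHgt).idxOf ((t.map pvHgt).foldl max (pvHgt f)) : Nat) : Int)))
            (some (((((f :: t).map pvHgt).idxOf ((t.map pvHgt).foldl max (pvHgt f)) : Nat) : Int) + 1)) := by
      unfold select_largest_face
      rw [pv_heights_eq]
      simp only [List.nil_append]
      have hmax : PySem.List.max? ((f :: t).map pvHgt) (fun y => y)
          = some ((t.map pvHgt).foldl max (pvHgt f)) := by
        simp [PySem.List.max?_id_cons]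
      rw [hmax]
      simp only [pv_index?_of_mem _ _ hMmem]
    have hB : select_largest_face_alt (f :: t)
        = PySem.List.slice (f :: t)
            (some (((((f :: t).map pvHgt).idxOf ((t.map pvHgt).foldl max (pvHgt f)) : Nat) : Int)))
            (some (((((f :: t).map pvHgt).idxOf ((t.map pvHgt).foldl max (pvHgt f)) : Nat) : Int) + 1)) := by
      unfold select_largest_face_alt
      rw [pv_fold_top]
    rw [hA, hB]
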